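-- pv_equiv track=rewrite | github.com/VolodKniah/Minesweeper-SAT-Solver | Minesweeper.py | min_clauses
-- ===== SOURCE A (Python) =====
-- from itertools import combinations
--
-- def min_clauses(vars, k):
--     clauses = []
--     n = len(vars)
--     m = n - k + 1
--     if m < 0:
--         return [()]
--     for subset in combinations(vars, m):
--         clauses.append(tuple(subset))
--     return clauses
-- ===== SOURCE B (Python) =====
-- def min_clauses(vs, k):
--     m = len(vs) - k + 1
--     if m < 0:
--         return [()]
--     clauses = []
--
--     def go(i, r, prefix):
--         if r == 0:
--             clauses.append(prefix)
--             return
--         if i == len(vs):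
--             return
--         go(i + 1, r - 1, prefix + (vs[i],))
--         go(i + 1, r, prefix)
--
--     go(0, m, ())
--     return clauses
-- ===== Notes on version B (the rewrite author's own statement) =====
-- stated objective: alternative
-- what changed: Replaces the itertools.combinations library call with a hand-written include/skip recursion that threads the growing prefix and appends finished tuples directly to the output list, emitting them in the same lexicographic-by-index order.
import Mathlib
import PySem

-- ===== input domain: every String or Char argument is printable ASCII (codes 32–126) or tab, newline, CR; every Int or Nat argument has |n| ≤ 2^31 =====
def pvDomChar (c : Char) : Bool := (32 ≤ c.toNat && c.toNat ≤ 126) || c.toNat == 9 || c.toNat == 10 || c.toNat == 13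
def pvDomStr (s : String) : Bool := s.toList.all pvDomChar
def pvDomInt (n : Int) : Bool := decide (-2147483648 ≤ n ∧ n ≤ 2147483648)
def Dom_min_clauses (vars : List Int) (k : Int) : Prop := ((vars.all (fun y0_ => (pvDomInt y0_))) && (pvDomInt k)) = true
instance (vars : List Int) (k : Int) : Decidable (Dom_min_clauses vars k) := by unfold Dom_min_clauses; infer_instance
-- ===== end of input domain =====

-- B replaces the itertools.combinations call with a hand-written include/skip recursion
-- threading the current prefix and appending finished tuples to the output (alternative
-- decomposition, same order and cost).

-- ===== PORT A =====
-- port of itertools.combinations(vs, r): standard lexicographic-by-index recursion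
def pyCombinations (r : Nat) (vs : List Int) : List (List Int) :=
  match r, vs with
  | 0, _ => [[]]
  | _ + 1, [] => []
  | r + 1, x :: xs => (pyCombinations r xs).map (fun c => x :: c) ++ pyCombinations (r + 1) xs

def min_clauses (vars : List Int) (k : Int) : List (List Int) :=
  let n : Int := vars.length
  let m : Int := n - k + 1
  if m < 0 then [[]]
  else (pyCombinations m.toNat vars).foldl (fun clauses subset => clauses ++ [subset]) []

-- ===== PORT B =====
-- go over the remaining suffix of vars (Python indexes with i; the suffix vs is vars from i on)
def goB (vs : List Int) (r : Nat) (pre : List Int) (acc : List (List Int)) : List (List Int) :=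
  match r, vs with
  | 0, _ => acc ++ [pre]
  | _ + 1, [] => acc
  | r + 1, x :: xs => goB xs (r + 1) pre (goB xs r (pre ++ [x]) acc)

def min_clauses_alt (vars : List Int) (k : Int) : List (List Int) :=
  let m : Int := (vars.length : Int) - k + 1
  if m < 0 then [[]]
  else goB vars m.toNat [] []

-- ===== PRECONDITION & SPEC =====
def Spec_min_clauses (vars : List Int) (k : Int) (out : List (List Int)) : Prop := out = min_clauses_alt vars k
instance (vars : List Int) (k : Int) (out : List (List Int)) : Decidable (Spec_min_clauses vars k out) := by unfold Spec_min_clauses; infer_instance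

-- ===== CLAIM (what is proved, stated in full; the proofs are below) =====
def Claim_equal_min_clauses : Prop := ∀ (vars : List Int) (k : Int), Dom_min_clauses vars k → Spec_min_clauses vars k (min_clauses vars k)

-- ===== LEMMAS AND PROOFS =====
theorem foldl_snoc (l : List (List Int)) (acc : List (List Int)) :
    l.foldl (fun clauses subset => clauses ++ [subset]) acc = acc ++ l := by
  induction l generalizing acc with
  | nil => simp [List.foldl]
  | cons x xs ih => simp [List.foldl, ih]

theorem goB_eq (vs : List Int) (r : Nat) (pre : List Int) (acc : List (List Int)) :
    goB vs r pre acc = acc ++ (pyCombinations r vs).map (fun c => pre ++ c) := by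
  induction vs generalizing r pre acc with
  | nil =>
    cases r with
    | zero => simp [goB, pyCombinations]
    | succ r => simp [goB, pyCombinations]
  | cons x xs ih =>
    cases r with
    | zero => simp [goB, pyCombinations]
    | succ r =>
      simp [goB, pyCombinations, ih, List.map_map, Function.comp, List.append_assoc]

-- ===== VERDICT (by name: the statement is the Claim_ definition above) =====
theorem min_clauses_spec : Claim_equal_min_clauses := by
  intro vars k _
  unfold Spec_min_clauses min_clauses min_clauses_alt
  simp only []
  split_ifs with h
  · rfl
  · rw [foldl_snoc, goB_eq]
    simp
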